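-- pv_equiv track=rewrite | github.com/nickkamel/TriCleaver | ribogate/common/folding_constraints.py | generate_folding_constraint_string
-- ===== SOURCE A (Python) =====
-- def generate_folding_constraint_string(seq_len, constrained_base_positions):
--     '''
--     Builds a constraint string to be used with Vienna RNA
--
--     Parameters:
--         seq_len (int): Length of the sequence to which the constraint applies
--         constrained_base_positions (list of ints): 1-indexed positions of the bases to be constrained as unpaired
--
--     Returns:
--         constraint (string): String where 'x' denotes corresponding base is forced unpaired and '.' denotes no constraint
--     '''
--
--     constraint = ''
--     for b in range(1, seq_len + 1):
--         if b in constrained_base_positions: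
--             constraint += 'x'
--         else:
--             constraint += '.'
--     return constraint
-- ===== SOURCE B (Python) =====
-- def generate_folding_constraint_string(seq_len, constrained_base_positions):
--     chars = ['.'] * seq_len
--     for pos in constrained_base_positions:
--         if 1 <= pos <= seq_len:
--             chars[pos - 1] = 'x'
--     return ''.join(chars)
-- ===== Notes on version B (the rewrite author's own statement) =====
-- stated objective: faster
-- what changed: Instead of scanning every position 1..seq_len and testing list membership (quadratic), B allocates a '.'-buffer once and scatters 'x' marks by iterating only over the constrained positions, ignoring out-of-range ones.
import Mathlib
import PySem

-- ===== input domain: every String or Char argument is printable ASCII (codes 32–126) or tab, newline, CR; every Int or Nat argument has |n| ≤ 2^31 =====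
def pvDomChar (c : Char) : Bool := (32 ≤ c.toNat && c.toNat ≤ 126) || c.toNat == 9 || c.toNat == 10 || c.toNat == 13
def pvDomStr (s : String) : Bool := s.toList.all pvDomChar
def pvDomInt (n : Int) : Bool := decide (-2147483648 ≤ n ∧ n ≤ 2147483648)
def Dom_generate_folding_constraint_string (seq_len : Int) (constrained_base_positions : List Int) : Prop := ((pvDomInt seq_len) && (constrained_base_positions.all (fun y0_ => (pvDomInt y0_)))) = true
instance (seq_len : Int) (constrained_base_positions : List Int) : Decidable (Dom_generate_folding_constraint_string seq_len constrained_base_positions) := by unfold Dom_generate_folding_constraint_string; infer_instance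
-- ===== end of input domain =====

-- B replaces A's scan of every position with a membership test by a one-pass scatter into a '.'-buffer (faster, asymptotic).


-- ===== PORT A =====
-- string built by += over range(1, seq_len+1) with a membership test
def generate_folding_constraint_string (seq_len : Int) (constrained_base_positions : List Int) : String :=
  String.mk ((PySem.List.pyRange 1 (seq_len + 1) 1).foldl
    (fun acc b => acc ++ [if constrained_base_positions.contains b then 'x' else '.']) [])

-- ===== PORT B =====
-- '.'-buffer of length seq_len; scatter 'x' at pos-1 for each in-range position
def generate_folding_constraint_string_alt (seq_len : Int) (constrained_base_positions : List Int) : String :=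
  String.mk (constrained_base_positions.foldl
    (fun cs pos => if 1 ≤ pos ∧ pos ≤ seq_len then cs.set (pos - 1).toNat 'x' else cs)
    (List.replicate seq_len.toNat '.'))

-- ===== PRECONDITION & SPEC =====
def Spec_generate_folding_constraint_string (seq_len : Int) (constrained_base_positions : List Int) (out : String) : Prop := out = generate_folding_constraint_string_alt seq_len constrained_base_positions
instance (seq_len : Int) (constrained_base_positions : List Int) (out : String) : Decidable (Spec_generate_folding_constraint_string seq_len constrained_base_positions out) := by unfold Spec_generate_folding_constraint_string; infer_instance

-- ===== CLAIM (what is proved, stated in full; the proofs are below) =====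
def Claim_equal_generate_folding_constraint_string : Prop := ∀ (seq_len : Int) (constrained_base_positions : List Int), Dom_generate_folding_constraint_string seq_len constrained_base_positions → Spec_generate_folding_constraint_string seq_len constrained_base_positions (generate_folding_constraint_string seq_len constrained_base_positions)

-- ===== LEMMAS AND PROOFS =====

-- A's append-fold is a map
theorem foldl_append_singleton {α β : Type} (g : α → β) (l : List α) (acc : List β) :
    l.foldl (fun acc b => acc ++ [g b]) acc = acc ++ l.map g := by
  induction l generalizing acc with
  | nil => simp
  | cons x xs ih => simp [List.foldl, ih]

-- B's scatter fold, characterized elementwise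
theorem scatter_length (n : Int) (ps : List Int) (cs : List Char) :
    (ps.foldl (fun cs pos => if 1 ≤ pos ∧ pos ≤ n then cs.set (pos - 1).toNat 'x' else cs) cs).length
      = cs.length := by
  induction ps generalizing cs with
  | nil => rfl
  | cons p rest ih =>
    simp only [List.foldl]
    rw [ih]
    split <;> simp

theorem scatter_getElem (n : Int) (ps : List Int) (cs : List Char) (i : Nat) (hi : i < cs.length)
    (hlen : (cs.length : Int) ≤ n) :
    (ps.foldl (fun cs pos => if 1 ≤ pos ∧ pos ≤ n then cs.set (pos - 1).toNat 'x' else cs) cs)[i]'(by rw [scatter_length]; exact hi)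
      = if ((i : Int) + 1) ∈ ps then 'x' else cs[i] := by
  induction ps generalizing cs with
  | nil => simp
  | cons p rest ih =>
    simp only [List.foldl]
    by_cases hp : 1 ≤ p ∧ p ≤ n
    · simp only [if_pos hp]
      rw [ih (cs.set (p - 1).toNat 'x') (by simpa using hi) (by simpa using hlen)]
      rw [List.getElem_set]
      by_cases hmem : ((i : Int) + 1) ∈ rest
      · simp [hmem, List.mem_cons]
      · by_cases heq : p = (i : Int) + 1
        · have h1 : p.toNat - 1 = i := by omega
          simp [hmem, heq, List.mem_cons]
        · have h1 : p.toNat - 1 ≠ i := by omega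
          have h2 : ((i : Int) + 1) ≠ p := fun h => heq h.symm
          simp [hmem, h1, h2, List.mem_cons]
    · simp only [if_neg hp]
      rw [ih cs hi hlen]
      have hin : (i : Int) < (cs.length : Int) := by exact_mod_cast hi
      have hne : ((i : Int) + 1) ≠ p := by intro h; exact hp ⟨by omega, by omega⟩
      simp [List.mem_cons, hne]

-- ===== VERDICT (by name: the statement is the Claim_ definition above) =====
theorem generate_folding_constraint_string_spec : Claim_equal_generate_folding_constraint_string := by
  intro n ps _
  unfold Spec_generate_folding_constraint_string
  unfold generate_folding_constraint_string generate_folding_constraint_string_alt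
  congr 1
  rw [foldl_append_singleton, List.nil_append]
  apply List.ext_getElem
  · rw [scatter_length]
    simp [PySem.List.length_pyRange_one]
  · intro i h1 h2
    have h2' := h2
    rw [scatter_length, List.length_replicate] at h2'
    rw [scatter_getElem n ps _ i (by simpa using h2') (by simp; omega)]
    rw [List.getElem_map, PySem.List.getElem_pyRange_one]
    rw [List.getElem_replicate]
    have : (1 : Int) + i = (i : Int) + 1 := by ring
    rw [this]
    by_cases hm : ((i : Int) + 1) ∈ ps
    · simp [hm]
    · simp [hm]
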